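-- pv_equiv track=rewrite | github.com/assadali22/academic_coursework_college_uni | Python Intro (Fall 2021 at Community College)/HW4/HW4_PS1.py | evenToFront
-- ===== SOURCE A (Python) =====
-- def evenToFront(data : list) -> list:
--     '''Bring the even elements to the front of the list.'''
--     oddList = []
--     for num in data:
--         if num % 2 != 0:
--             oddList.append(num)
--
--
--     for num in oddList:
--         data.remove(num)
--         data.append(num)
--
--     return data
-- ===== SOURCE B (Python) =====
-- def evenToFront(data : list) -> list:
--     '''Bring the even elements to the front of the list.'''
--     data.sort(key=lambda x: x % 2 != 0)
--     return data
-- ===== Notes on version B (the rewrite author's own statement) =====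
-- stated objective: faster
-- what changed: Replaces A's two loops (collect odds, then for each odd a linear-scan list.remove plus append) by a single in-place stable sort on the boolean parity key, which puts evens before odds while preserving relative order.
import Mathlib
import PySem

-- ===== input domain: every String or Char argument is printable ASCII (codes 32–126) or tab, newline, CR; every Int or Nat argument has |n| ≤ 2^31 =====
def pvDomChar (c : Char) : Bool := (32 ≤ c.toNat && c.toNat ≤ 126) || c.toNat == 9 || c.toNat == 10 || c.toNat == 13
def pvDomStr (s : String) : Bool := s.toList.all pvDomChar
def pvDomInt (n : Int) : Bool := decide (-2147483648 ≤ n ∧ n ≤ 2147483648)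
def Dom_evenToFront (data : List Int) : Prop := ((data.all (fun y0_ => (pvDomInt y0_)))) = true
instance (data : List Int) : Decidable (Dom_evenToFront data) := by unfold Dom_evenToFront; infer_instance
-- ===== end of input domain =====

-- B replaces A's collect-odds-then-remove/append loops with one stable sort on the boolean
-- parity key (evens first); both A and B mutate `data` in place in Python and return it.


-- ===== PORT A =====
-- `data.remove(num)` never raises here (each num taken from oddList is present in the
-- current list), so `.getD d` on remove?'s result is exact; A is total.
def evenToFront (data : List Int) : List Int :=
  let oddList := data.foldl (fun acc num =>
    if PySem.Int.mod num 2 ≠ 0 then acc ++ [num] else acc) []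
  oddList.foldl (fun d num => ((PySem.List.remove? d num).getD d) ++ [num]) data

-- ===== PORT B =====
def evenToFront_alt (data : List Int) : List Int :=
  PySem.List.sorted data (fun x => decide (PySem.Int.mod x 2 ≠ 0))

-- ===== PRECONDITION & SPEC =====
def Spec_evenToFront (data : List Int) (out : List Int) : Prop := out = evenToFront_alt data
instance (data : List Int) (out : List Int) : Decidable (Spec_evenToFront data out) := by unfold Spec_evenToFront; infer_instance

-- ===== CLAIM (what is proved, stated in full; the proofs are below) =====
def Claim_equal_evenToFront : Prop := ∀ (data : List Int), Dom_evenToFront data → Spec_evenToFront data (evenToFront data)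

-- ===== LEMMAS AND PROOFS =====

-- the parity key both ports use
def pk (x : Int) : Bool := decide (PySem.Int.mod x 2 ≠ 0)

-- the common target: stable parity partition, evens first
def part (d : List Int) : List Int := d.filter (fun x => !pk x) ++ d.filter pk

-- A's first loop collects exactly the odd elements, in order
lemma oddLoop_eq (d : List Int) (init : List Int) :
    d.foldl (fun acc num => if PySem.Int.mod num 2 ≠ 0 then acc ++ [num] else acc) init
      = init ++ d.filter pk := by
  induction d generalizing init with
  | nil => simp
  | cons x t ih =>
    rw [List.foldl_cons, ih, List.filter_cons]
    by_cases h : PySem.Int.mod x 2 ≠ 0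
    · have hx : pk x = true := decide_eq_true h
      rw [if_pos h, hx]
      simp
    · have hx : pk x = false := decide_eq_false h
      rw [if_neg h, hx]
      simp

lemma remove_append (d acc : List Int) (o : Int) (ho : o ∈ d) :
    (PySem.List.remove? (d ++ acc) o).getD (d ++ acc) = d.erase o ++ acc := by
  rw [PySem.List.remove?_eq_some_erase (d ++ acc) o (List.mem_append.2 (Or.inl ho)),
      Option.getD_some, List.erase_append_left acc ho]

lemma pk_head_of_filter (d t : List Int) (o : Int) (h : d.filter pk = o :: t) :
    pk o = true := by
  have : o ∈ d.filter pk := by rw [h]; exact List.mem_cons_self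
  exact (List.mem_filter.1 this).2

lemma filter_erase_of_filter_cons (d : List Int) : ∀ (t : List Int) (o : Int),
    d.filter pk = o :: t → (d.erase o).filter pk = t := by
  induction d with
  | nil => intro t o h; simp at h
  | cons a d ih =>
    intro t o h
    rw [List.filter_cons] at h
    cases ha : pk a with
    | true =>
      rw [ha, if_pos rfl] at h
      obtain ⟨hao, ht⟩ := List.cons.inj h
      subst hao
      rw [List.erase_cons_head, ht]
    | false =>
      rw [ha, if_neg (by simp)] at h
      have hne : a ≠ o := by
        intro he; rw [he] at ha
        rw [pk_head_of_filter d t o h] at ha; simp at ha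
      rw [List.erase_cons_tail (by simpa using hne), List.filter_cons, ha,
          if_neg (by simp), ih t o h]

lemma filter_not_erase (d : List Int) : ∀ (t : List Int) (o : Int),
    d.filter pk = o :: t →
    (d.erase o).filter (fun x => !pk x) = d.filter (fun x => !pk x) := by
  induction d with
  | nil => intro t o h; simp at h
  | cons a d ih =>
    intro t o h
    rw [List.filter_cons] at h
    cases ha : pk a with
    | true =>
      rw [ha, if_pos rfl] at h
      obtain ⟨hao, _⟩ := List.cons.inj h
      subst hao
      rw [List.erase_cons_head, List.filter_cons, ha]
      simp
    | false =>
      rw [ha, if_neg (by simp)] at h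
      have hne : a ≠ o := by
        intro he; rw [he] at ha
        rw [pk_head_of_filter d t o h] at ha; simp at ha
      rw [List.erase_cons_tail (by simpa using hne), List.filter_cons, List.filter_cons,
          ha, ih t o h]

lemma mainLoop (os : List Int) : ∀ (d acc : List Int), d.filter pk = os →
    os.foldl (fun l num => ((PySem.List.remove? l num).getD l) ++ [num]) (d ++ acc)
      = d.filter (fun x => !pk x) ++ acc ++ os := by
  induction os with
  | nil =>
    intro d acc h
    have hall : d.filter (fun x => !pk x) = d := by
      apply List.filter_eq_self.2
      intro a ha
      have hk : pk a = false := by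
        cases hk : pk a with
        | false => rfl
        | true =>
          have : a ∈ d.filter pk := List.mem_filter.2 ⟨ha, hk⟩
          rw [h] at this; simp at this
      simp [hk]
    simp [hall]
  | cons o t ih =>
    intro d acc h
    have ho : o ∈ d := by
      have : o ∈ d.filter pk := by rw [h]; exact List.mem_cons_self
      exact (List.mem_filter.1 this).1
    rw [List.foldl_cons, remove_append d acc o ho, List.append_assoc,
        ih (d.erase o) (acc ++ [o]) (filter_erase_of_filter_cons d t o h),
        filter_not_erase d t o h]
    simp

lemma A_eq_part (d : List Int) : evenToFront d = part d := by
  have h1 := oddLoop_eq d []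
  rw [List.nil_append] at h1
  have h := mainLoop (d.filter pk) d [] rfl
  rw [List.append_nil] at h
  simp only [evenToFront, h1, h, part, List.append_nil]

-- insertBy unfolding equation
lemma insertBy_cons (before : Int → Int → Bool) (x y : Int) (ys : List Int) :
    PySem.List.insertBy before x (y :: ys)
      = if before x y then x :: y :: ys else y :: PySem.List.insertBy before x ys := rfl

-- an odd element is inserted at the very end (its key is maximal)
lemma insert_last (x : Int) (hx : pk x = true) : ∀ (ys : List Int),
    PySem.List.insertBy (fun a b => decide (pk a < pk b)) x ys = ys ++ [x] := by
  intro ys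
  induction ys with
  | nil => rfl
  | cons y t ih =>
    rw [insertBy_cons]
    have hb : decide (pk x < pk y) = false := by
      rw [hx]; cases pk y <;> rfl
    rw [hb, ih]
    simp

-- an even element lands between the evens and the odds
lemma insert_even (x : Int) (os : List Int) (hx : pk x = false)
    (hos : ∀ o ∈ os, pk o = true) : ∀ (es : List Int), (∀ e ∈ es, pk e = false) →
    PySem.List.insertBy (fun a b => decide (pk a < pk b)) x (es ++ os) = es ++ x :: os := by
  intro es
  induction es with
  | nil =>
    intro _
    cases os with
    | nil => rfl
    | cons o t =>
      rw [List.nil_append, insertBy_cons]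
      have hb : decide (pk x < pk o) = true := by
        rw [hx, hos o List.mem_cons_self]; rfl
      rw [hb]
      simp
  | cons e t ih =>
    intro he
    have hke : pk e = false := he e List.mem_cons_self
    rw [List.cons_append, insertBy_cons]
    have hb : decide (pk x < pk e) = false := by rw [hx, hke]; rfl
    rw [hb, ih (fun e' h' => he e' (List.mem_cons_of_mem e h'))]
    simp

lemma B_fold (d : List Int) : ∀ (es os : List Int),
    (∀ e ∈ es, pk e = false) → (∀ o ∈ os, pk o = true) →
    d.foldl (fun acc x => PySem.List.insertBy (fun a b => decide (pk a < pk b)) x acc) (es ++ os)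
      = (es ++ d.filter (fun x => !pk x)) ++ (os ++ d.filter pk) := by
  induction d with
  | nil => intro es os _ _; simp
  | cons x t ih =>
    intro es os he hos
    rw [List.foldl_cons]
    cases h : pk x with
    | false =>
      rw [insert_even x os h hos es he,
          show es ++ x :: os = (es ++ [x]) ++ os by simp,
          ih (es ++ [x]) os
            (by intro e hee
                rcases List.mem_append.1 hee with h' | h'
                · exact he e h'
                · simp at h'; rw [h']; exact h) hos]
      simp [h]
    | true =>
      rw [insert_last x h (es ++ os), List.append_assoc,
          ih es (os ++ [x]) he
            (by intro o hoo
                rcases List.mem_append.1 hoo with h' | h'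
                · exact hos o h'
                · simp at h'; rw [h']; exact h)]
      simp [h]

lemma B_eq_part (d : List Int) : evenToFront_alt d = part d := by
  have hk : (fun x : Int => decide (PySem.Int.mod x 2 ≠ 0)) = pk := rfl
  rw [evenToFront_alt, hk, PySem.List.sorted_eq_foldl_insertBy]
  have h := B_fold d [] [] (by simp) (by simp)
  simpa [part] using h

-- ===== VERDICT (by name: the statement is the Claim_ definition above) =====
theorem evenToFront_spec : Claim_equal_evenToFront := by
  intro data _
  show evenToFront data = evenToFront_alt data
  rw [A_eq_part, B_eq_part]
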